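-- pv_equiv track=rewrite | github.com/eli64s/readme-ai | readmeai/preprocessor/document_cleaner.py | _normalize_indentation
-- ===== SOURCE A (Python) =====
-- def _normalize_indentation(code: str) -> str:
--     """Normalize indentation to spaces."""
--     if not code:
--         return code
--
--     lines = code.splitlines()
--     normalized_lines = []
--
--     for line in lines:
--         if not line.strip():
--             normalized_lines.append("")
--             continue
--
--         # Calculate leading whitespace count, handling tabs
--         leading_space_count = 0
--         for char in line:
--             if char == " ":
--                 leading_space_count += 1
--             elif char == "\t":
--                 # Round up to the next multiple of 4
--                 leading_space_count = (leading_space_count + 4) & ~3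
--             else:
--                 break
--
--         # Preserve the original indentation level
--         normalized_line = " " * leading_space_count + line.lstrip()
--         normalized_lines.append(normalized_line)
--
--     return "\n".join(normalized_lines)
-- ===== SOURCE B (Python) =====
-- def _normalize_indentation(code: str) -> str:
--     """Normalize indentation to spaces."""
--     if not code:
--         return code
--     out = []
--     for line in code.splitlines():
--         if not line.strip():
--             out.append("")
--         else:
--             stripped = line.lstrip(" \t")
--             prefix = line[:len(line) - len(stripped)]
--             out.append(" " * len(prefix.expandtabs(4)) + line.lstrip())
--     return "\n".join(out)
-- ===== Notes on version B (the rewrite author's own statement) =====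
-- stated objective: idiomatic
-- what changed: Replaces A's explicit per-character scanning loop with its bit-mask round-up ((count+4) & ~3) by slicing off the leading run of spaces and tabs and measuring len(prefix.expandtabs(4)), which performs the same tab-to-column arithmetic via the library.
import Mathlib
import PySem

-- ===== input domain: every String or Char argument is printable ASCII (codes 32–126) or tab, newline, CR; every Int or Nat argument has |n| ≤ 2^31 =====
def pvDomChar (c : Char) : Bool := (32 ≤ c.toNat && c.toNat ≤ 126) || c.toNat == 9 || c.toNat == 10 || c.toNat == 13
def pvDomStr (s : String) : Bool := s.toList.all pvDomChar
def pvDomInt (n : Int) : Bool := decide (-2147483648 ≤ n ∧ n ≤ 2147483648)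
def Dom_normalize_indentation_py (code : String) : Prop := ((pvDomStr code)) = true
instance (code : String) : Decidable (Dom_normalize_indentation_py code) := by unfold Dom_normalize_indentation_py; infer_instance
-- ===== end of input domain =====

-- B replaces A's explicit leading-whitespace scanning loop (with its bit-mask round-up) by
-- slicing off the leading space/tab run and measuring len(prefix.expandtabs(4)) — idiomatic, same cost.

-- ===== PORT A =====
-- A's inner character loop: scan leading ' '/'\t', '\t' rounds the count up via (c+4) & ~3
def normA_count : List Char → Int → Int
  | [], n => n
  | c :: cs, n =>
    if c = ' ' then normA_count cs (n + 1)
    else if c = '\t' then normA_count cs (PySem.Int.band (n + 4) (Int.not 3))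
    else n

def normA_line (line : String) : String :=
  if PySem.Str.strip line = "" then ""
  else String.ofList (List.replicate (normA_count line.toList 0).toNat ' ' ++ (PySem.Str.lstrip line).toList)

def normalize_indentation_py (code : String) : String :=
  if code = "" then code
  else PySem.Str.join "\n" ((PySem.Str.splitlines code).map normA_line)

-- ===== PORT B =====
-- len(prefix.expandtabs(4)) for a prefix of spaces/tabs only: exact column arithmetic of CPython's expandtabs
def normB_col (col : Nat) (c : Char) : Nat := if c = '\t' then col + (4 - col % 4) else col + 1

def normB_line (line : String) : String :=
  if PySem.Str.strip line = "" then ""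
  else
    -- stripped = line.lstrip(" \t") : dropWhile is exact for a two-char ASCII strip set
    let cs := line.toList
    let stripped := cs.dropWhile (fun c => c == ' ' || c == '\t')
    let pre := cs.take (cs.length - stripped.length)        -- line[:len(line)-len(stripped)]
    String.ofList (List.replicate (pre.foldl normB_col 0) ' ' ++ (PySem.Str.lstrip line).toList)

def normalize_indentation_py_alt (code : String) : String :=
  if code = "" then code
  else PySem.Str.join "\n" ((PySem.Str.splitlines code).map normB_line)

-- ===== PRECONDITION & SPEC =====
def Spec_normalize_indentation_py (code : String) (out : String) : Prop := out = normalize_indentation_py_alt code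
instance (code : String) (out : String) : Decidable (Spec_normalize_indentation_py code out) := by unfold Spec_normalize_indentation_py; infer_instance

-- ===== CLAIM (what is proved, stated in full; the proofs are below) =====
def Claim_equal_normalize_indentation_py : Prop := ∀ (code : String), Dom_normalize_indentation_py code → Spec_normalize_indentation_py code (normalize_indentation_py code)

-- ===== LEMMAS AND PROOFS =====

-- B's sliced prefix is exactly the run of leading spaces/tabs
theorem take_sub_dropWhile (p : Char → Bool) (cs : List Char) :
    cs.take (cs.length - (cs.dropWhile p).length) = cs.takeWhile p := by
  have h : cs.length - (cs.dropWhile p).length = (cs.takeWhile p).length := by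
    have hl : (cs.takeWhile p).length + (cs.dropWhile p).length = cs.length := by
      rw [← List.length_append, List.takeWhile_append_dropWhile]
    omega
  rw [h]
  exact (List.prefix_iff_eq_take.mp (List.takeWhile_prefix p)).symm

-- A's bit trick (n+4) & ~3 is the expandtabs column step
theorem band_step (n : Nat) :
    PySem.Int.band ((n : Int) + 4) (Int.not 3) = ((n + (4 - n % 4) : Nat) : Int) := by
  have h3 : (Int.not 3) = -4 := by decide
  have hcast : ((n : Int) + 4) = ((n + 4 : Nat) : Int) := by push_cast; ring
  have hnn : (0 : Int) ≤ (n : Int) + 4 := by positivity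
  have htn : ((n : Int) + 4).toNat = n + 4 := by omega
  rw [h3]
  simp only [PySem.Int.band, if_pos hnn, if_neg (by norm_num : ¬ (0 : Int) ≤ (-4 : Int)), htn]
  have hmod : (n + 4) &&& (-(-4 : Int) - 1).toNat = (n + 4) % 4 := by
    have h34 : (-(-4 : Int) - 1).toNat = 3 := by decide
    rw [h34]
    have := Nat.and_two_pow_sub_one_eq_mod (n + 4) 2
    norm_num at this; omega
  rw [hmod]
  have : n + 4 - (n + 4) % 4 = n + (4 - n % 4) := by omega
  rw [this]

-- A's scanning loop equals B's fold of the expandtabs step over the takeWhile prefix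
theorem count_eq (cs : List Char) (n : Nat) :
    normA_count cs (n : Int)
      = (((cs.takeWhile (fun c => c == ' ' || c == '\t')).foldl normB_col n : Nat) : Int) := by
  induction cs generalizing n with
  | nil => rfl
  | cons c cs ih =>
    by_cases hs : c = ' '
    · subst hs
      have hcast : ((n : Int) + 1) = ((n + 1 : Nat) : Int) := by push_cast; ring
      simp only [normA_count, List.takeWhile_cons, show ((' ' == ' ') || (' ' == '\t')) = true from rfl,
        if_pos, List.foldl_cons, show normB_col n ' ' = n + 1 from rfl, hcast]
      exact ih (n + 1)
    · by_cases ht : c = '\t'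
      · subst ht
        simp only [normA_count, if_neg (show ¬ ('\t' : Char) = ' ' by decide),
          List.takeWhile_cons, show (('\t' == ' ') || ('\t' == '\t')) = true from rfl,
          if_pos, List.foldl_cons, show normB_col n '\t' = n + (4 - n % 4) from rfl]
        rw [band_step]
        exact ih (n + (4 - n % 4))
      · have hp : ((c == ' ') || (c == '\t')) = false := by
          simp [hs, ht]
        simp [normA_count, hs, ht, hp]

theorem line_eq (line : String) : normA_line line = normB_line line := by
  by_cases h : PySem.Str.strip line = ""
  · simp [normA_line, normB_line, h]
  · have hc := count_eq line.toList 0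
    simp only [Nat.cast_zero] at hc
    simp only [normA_line, normB_line, if_neg h, take_sub_dropWhile, hc, Int.toNat_natCast]

-- ===== VERDICT (by name: the statement is the Claim_ definition above) =====
theorem normalize_indentation_py_spec : Claim_equal_normalize_indentation_py := by
  intro code _
  unfold Spec_normalize_indentation_py normalize_indentation_py normalize_indentation_py_alt
  by_cases h : code = ""
  · simp [h]
  · have hf : normA_line = normB_line := funext line_eq
    simp only [h, hf]
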